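-- pv_equiv track=rewrite | github.com/kulakaka/NUSCS | CS1010E/MockPEtest.py | caterpillar_with_backside
-- ===== SOURCE A (Python) =====
-- def caterpillar_with_backside (n):
--     pillar = []
--     string =''
--     for i in range(n-1):
--         if i == 0:
--             pillar.append("c")
--         pillar.append("Q")
--
--     pillar.append(6)
--
--     for i in pillar:
--         string = string + str(i)
--     return string
-- ===== SOURCE B (Python) =====
-- def caterpillar_with_backside(n):
--     if n > 1:
--         return "c" + "Q" * (n - 1) + "6"
--     return "6"
-- ===== Notes on version B (the rewrite author's own statement) =====
-- stated objective: simpler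
-- what changed: Replaces the two loops (building a character list item by item, then concatenating it) with a single closed-form string expression 'c' + 'Q'*(n-1) + '6', guarded for n <= 1.
import Mathlib
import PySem

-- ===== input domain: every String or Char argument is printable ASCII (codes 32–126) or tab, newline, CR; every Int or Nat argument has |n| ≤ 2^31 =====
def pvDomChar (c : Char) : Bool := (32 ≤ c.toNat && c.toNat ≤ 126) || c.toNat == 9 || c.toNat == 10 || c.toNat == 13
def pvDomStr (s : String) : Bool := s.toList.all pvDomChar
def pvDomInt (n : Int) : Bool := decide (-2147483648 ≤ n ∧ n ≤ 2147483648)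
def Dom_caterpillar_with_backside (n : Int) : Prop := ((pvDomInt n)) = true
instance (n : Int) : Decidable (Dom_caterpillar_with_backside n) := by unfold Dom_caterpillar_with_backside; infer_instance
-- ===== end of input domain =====

-- B replaces A's two loops with one closed-form string expression; return value only.
-- ===== PORT A =====
-- pillar.append(x) in the loop is ported as x :: acc on a reversed accumulator, reversed once after the loop
def caterpillar_with_backside (n : Int) : String :=
  let pillarRev : List String :=
    (PySem.List.pyRange 0 (n - 1) 1).foldl
      (fun acc i => let acc' := if i == 0 then "c" :: acc else acc; "Q" :: acc') []
  let pillar := pillarRev.reverse ++ [PySem.Int.toStr 6]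
  pillar.foldl (fun s t => s ++ t) ""

-- ===== PORT B =====
-- "Q" * (n - 1) is string repetition: ported as char-list repetition (exact for any Int count)
def caterpillar_with_backside_alt (n : Int) : String :=
  if n > 1 then "c" ++ String.ofList (PySem.List.pyRepeat ['Q'] (n - 1)) ++ "6" else "6"

-- ===== PRECONDITION & SPEC =====
def Spec_caterpillar_with_backside (n : Int) (out : String) : Prop := out = caterpillar_with_backside_alt n
instance (n : Int) (out : String) : Decidable (Spec_caterpillar_with_backside n out) := by unfold Spec_caterpillar_with_backside; infer_instance

-- ===== CLAIM (what is proved, stated in full; the proofs are below) =====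
def Claim_equal_caterpillar_with_backside : Prop := ∀ (n : Int), Dom_caterpillar_with_backside n → Spec_caterpillar_with_backside n (caterpillar_with_backside n)

-- ===== LEMMAS AND PROOFS =====
theorem pillar_fold (m : Nat) (hm : 1 ≤ m) :
    (PySem.List.pyRange 0 (m : Int) 1).foldl
      (fun acc i => let acc' := if i == 0 then "c" :: acc else acc; "Q" :: acc') ([] : List String)
    = List.replicate m "Q" ++ ["c"] := by
  induction m with
  | zero => omega
  | succ k ih =>
    by_cases hk : 1 ≤ k
    · have hsplit := PySem.List.pyRange_one_succ_right (a := 0) (b := (k : Int)) (by positivity)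
      have hcast : ((k + 1 : Nat) : Int) = (k : Int) + 1 := by push_cast; ring
      rw [hcast, hsplit, List.foldl_append, ih hk]
      have hne : ((k : Int) == 0) = false := by
        simp only [beq_eq_false_iff_ne, ne_eq]
        exact_mod_cast (by omega : k ≠ 0)
      simp only [List.foldl_cons, List.foldl_nil]
      rw [hne]
      simp [List.replicate_succ]
    · interval_cases k
      decide

theorem foldl_append_replicate (m : Nat) (s : String) :
    (List.replicate m "Q").foldl (fun a t => a ++ t) s
      = s ++ String.ofList (List.replicate m 'Q') := by
  induction m generalizing s with
  | zero =>
    apply String.ext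
    simp
  | succ k ih =>
    rw [List.replicate_succ, List.foldl_cons, ih]
    apply String.ext
    simp [List.replicate_succ]

theorem caterpillar_with_backside_spec : Claim_equal_caterpillar_with_backside := by
  intro n _
  unfold Spec_caterpillar_with_backside caterpillar_with_backside caterpillar_with_backside_alt
  by_cases h : n > 1
  · have hm : n - 1 = ((n - 1).toNat : Int) := by omega
    have hm1 : 1 ≤ (n - 1).toNat := by omega
    rw [hm, pillar_fold _ hm1, if_pos h, hm, PySem.List.pyRepeat_singleton]
    have ht : ((((n - 1).toNat : Int)).toNat) = (n - 1).toNat := by omega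
    rw [ht]
    simp only [List.reverse_append, List.reverse_cons, List.reverse_nil, List.nil_append,
      List.reverse_replicate, List.cons_append, List.foldl_cons, List.foldl_append,
      List.foldl_nil]
    rw [foldl_append_replicate]
    apply String.ext
    simp [PySem.Int.toStr]
    decide
  · rw [PySem.List.pyRange_one_eq_nil (by omega), if_neg h]
    simp [PySem.Int.toStr]
    decide
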